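-- pv_equiv track=rewrite | github.com/LeeDayday/programmers | src/python/30-49994.py | solution
-- ===== SOURCE A (Python) =====
-- move = {'U': (0, 1), 'D': (0, -1), 'R': (1, 0), 'L': (-1, 0)}
--
-- def solution(dirs):
--     answer = 0
--     visited = set() # (출발좌표, 도착좌표) 정보 저장
--     curr_x, curr_y = 0, 0 # 현재 위치
--
--     for cmd in dirs:
--
--         new_x = curr_x + move[cmd][0]
--         new_y = curr_y + move[cmd][1]
--
--         # 범위 내에 존재
--         if -5 <= new_x <= 5 and -5 <= new_y <= 5:
--             # 새롭게 방문하는 경우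
--             if (curr_x, curr_y, new_x, new_y) not in visited: # 양방향 경로 고려
--                 # visited 추가 (양방향 추가)
--                 visited.add((curr_x, curr_y, new_x, new_y))
--                 visited.add((new_x, new_y, curr_x, curr_y))
--                 answer += 1
--             # 현재 위치 갱신
--             curr_x = new_x
--             curr_y = new_y
--
--
--     return answer
-- ===== SOURCE B (Python) =====
-- def solution(dirs):
--     step = {'U': (0, 1), 'D': (0, -1), 'R': (1, 0), 'L': (-1, 0)}
--     x, y = 0, 0
--     codes = []
--     # pass 1: walk, encoding each traversed segment as one base-11 integer code
--     # of its lexicographically-smaller-first endpoint pair (direction-insensitive)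
--     for cmd in dirs:
--         dx, dy = step[cmd]
--         nx, ny = x + dx, y + dy
--         if -5 <= nx <= 5 and -5 <= ny <= 5:
--             a, b = ((x, y), (nx, ny)) if (x, y) <= (nx, ny) else ((nx, ny), (x, y))
--             codes.append((((a[0] + 5) * 11 + a[1] + 5) * 11 + b[0] + 5) * 11 + b[1] + 5)
--             x, y = nx, ny
--     # pass 2: sort the codes and count runs (distinct values) by scanning adjacent pairs
--     codes.sort()
--     count = 0
--     prev = None
--     for c in codes:
--         if c != prev:
--             count += 1
--         prev = c
--     return count
-- ===== Notes on version B (the rewrite author's own statement) =====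
-- stated objective: alternative
-- what changed: A dedups on the fly with a set of directed 4-tuples (each edge stored in both directions) and an inline counter; B keeps no set at all: it encodes each traversed segment as one base-11 integer code of its canonical endpoint pair, then sorts the code list and counts distinct values with an adjacent-pair scan.
import Mathlib
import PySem

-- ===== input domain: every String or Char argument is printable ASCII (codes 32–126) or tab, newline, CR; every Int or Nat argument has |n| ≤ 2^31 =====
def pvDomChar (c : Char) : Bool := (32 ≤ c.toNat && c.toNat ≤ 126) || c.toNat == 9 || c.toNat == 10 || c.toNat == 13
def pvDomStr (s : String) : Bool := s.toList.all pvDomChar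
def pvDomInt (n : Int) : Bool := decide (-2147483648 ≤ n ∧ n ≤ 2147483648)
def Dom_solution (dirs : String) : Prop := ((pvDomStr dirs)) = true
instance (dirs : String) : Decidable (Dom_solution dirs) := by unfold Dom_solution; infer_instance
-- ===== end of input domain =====

-- B replaces A's on-the-fly set of directed 4-tuples by a two-phase scheme: encode each
-- traversed segment as one base-11 integer code of its canonical endpoint pair, then sort
-- the codes and count distinct values by an adjacent scan (objective: alternative).

-- ===== PORT A =====
-- move = {'U': (0, 1), 'D': (0, -1), 'R': (1, 0), 'L': (-1, 0)}
def moveA : PySem.Dict Char (Int × Int) :=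
  PySem.Dict.ofList [('U', (0, 1)), ('D', (0, -1)), ('R', (1, 0)), ('L', (-1, 0))]

-- state = (answer, visited, curr_x, curr_y); move[cmd] ported as getD … (0,0),
-- exact under Pre_solution (Python raises KeyError on other chars, excluded by Pre_).
def stepA (st : Int × PySem.Set (Int × Int × Int × Int) × Int × Int) (cmd : Char) :
    Int × PySem.Set (Int × Int × Int × Int) × Int × Int :=
  let m := PySem.Dict.getD moveA cmd (0, 0)
  let nx := st.2.2.1 + m.1
  let ny := st.2.2.2 + m.2
  if -5 ≤ nx ∧ nx ≤ 5 ∧ -5 ≤ ny ∧ ny ≤ 5 then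
    if PySem.Set.contains st.2.1 (st.2.2.1, st.2.2.2, nx, ny) then
      (st.1, st.2.1, nx, ny)
    else
      (st.1 + 1,
       PySem.Set.add (PySem.Set.add st.2.1 (st.2.2.1, st.2.2.2, nx, ny)) (nx, ny, st.2.2.1, st.2.2.2),
       nx, ny)
  else st

def solution (dirs : String) : Int :=
  (dirs.toList.foldl stepA (0, PySem.Set.empty, 0, 0)).1

-- ===== PORT B =====
def deltaB : PySem.Dict Char (Int × Int) :=
  PySem.Dict.ofList [('U', (0, 1)), ('D', (0, -1)), ('R', (1, 0)), ('L', (-1, 0))]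

-- pass 1: state = (x, y, codes); each in-bounds segment appends the base-11 code of its
-- lexicographically-smaller-first endpoint pair ((x,y) <= (nx,ny) is Python tuple order)
def stepB (st : Int × Int × List Int) (cmd : Char) : Int × Int × List Int :=
  let m := PySem.Dict.getD deltaB cmd (0, 0)
  let nx := st.1 + m.1
  let ny := st.2.1 + m.2
  if -5 ≤ nx ∧ nx ≤ 5 ∧ -5 ≤ ny ∧ ny ≤ 5 then
    let ab := if st.1 < nx ∨ (st.1 = nx ∧ st.2.1 ≤ ny)
      then ((st.1, st.2.1), (nx, ny)) else ((nx, ny), (st.1, st.2.1))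
    (nx, ny, st.2.2 ++ [(((ab.1.1 + 5) * 11 + ab.1.2 + 5) * 11 + ab.2.1 + 5) * 11 + ab.2.2 + 5])
  else st

-- pass 2 scan: state = (count, prev); 'if c != prev: count += 1; prev = c'
def scanStep (st : Int × Option Int) (c : Int) : Int × Option Int :=
  if some c ≠ st.2 then (st.1 + 1, some c) else (st.1, some c)

def solution_alt (dirs : String) : Int :=
  let fin := dirs.toList.foldl stepB ((0 : Int), (0 : Int), ([] : List Int))
  let codes := PySem.List.sorted fin.2.2 (fun x => x) false
  (codes.foldl scanStep ((0 : Int), (none : Option Int))).1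

-- ===== PRECONDITION & SPEC =====
-- Pre_ admits exactly the command strings Python A accepts: any other character
-- raises KeyError in move[cmd] (B raises the same way).
def Pre_solution (dirs : String) : Prop :=
  dirs.toList.all (fun c => c == 'U' || c == 'D' || c == 'R' || c == 'L') = true
instance (dirs : String) : Decidable (Pre_solution dirs) := by unfold Pre_solution; infer_instance

def pvWitness_solution : String := "ULURRDLLU"

def Spec_solution (dirs : String) (out : Int) : Prop := out = solution_alt dirs
instance (dirs : String) (out : Int) : Decidable (Spec_solution dirs out) := by unfold Spec_solution; infer_instance

-- ===== CLAIM (what is proved, stated in full; the proofs are below) =====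
def Claim_equal_solution : Prop := ∀ (dirs : String), Dom_solution dirs → Pre_solution dirs → Spec_solution dirs (solution dirs)

-- ===== LEMMAS AND PROOFS =====

-- ghost path of the walk (proof device shared by both invariants)
def lastD (path : List (Int × Int)) : Int × Int := path.getLast?.getD (0, 0)

def pathStep (p : List (Int × Int)) (c : Char) : List (Int × Int) :=
  let m := PySem.Dict.getD moveA c (0, 0)
  let nx := (lastD p).1 + m.1
  let ny := (lastD p).2 + m.2
  if -5 ≤ nx ∧ nx ≤ 5 ∧ -5 ≤ ny ∧ ny ≤ 5 then p ++ [(nx, ny)] else p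

def canonB (p q : Int × Int) : (Int × Int) × (Int × Int) :=
  if p.1 < q.1 ∨ (p.1 = q.1 ∧ p.2 ≤ q.2) then (p, q) else (q, p)

def consec (path : List (Int × Int)) : List ((Int × Int) × (Int × Int)) :=
  path.zip path.tail

def edgesOf (path : List (Int × Int)) : List ((Int × Int) × (Int × Int)) :=
  (consec path).map (fun pq => canonB pq.1 pq.2)

def dirListOf (path : List (Int × Int)) : List (Int × Int × Int × Int) :=
  (consec path).flatMap (fun pq => [(pq.1.1, pq.1.2, pq.2.1, pq.2.2), (pq.2.1, pq.2.2, pq.1.1, pq.1.2)])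

def enc (e : (Int × Int) × (Int × Int)) : Int :=
  (((e.1.1 + 5) * 11 + e.1.2 + 5) * 11 + e.2.1 + 5) * 11 + e.2.2 + 5

def InB (pt : Int × Int) : Prop := -5 ≤ pt.1 ∧ pt.1 ≤ 5 ∧ -5 ≤ pt.2 ∧ pt.2 ≤ 5

lemma canonB_eq_iff (a b p q : Int × Int) :
    canonB a b = canonB p q ↔ (a = p ∧ b = q) ∨ (a = q ∧ b = p) := by
  obtain ⟨a1, a2⟩ := a; obtain ⟨b1, b2⟩ := b; obtain ⟨p1, p2⟩ := p; obtain ⟨q1, q2⟩ := q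
  simp only [canonB, Prod.mk.injEq]
  split_ifs <;> simp only [Prod.mk.injEq] <;> omega

lemma consec_append (path : List (Int × Int)) (x : Int × Int) (h : path ≠ []) :
    consec (path ++ [x]) = consec path ++ [(lastD path, x)] := by
  induction path with
  | nil => simp at h
  | cons a t ih =>
    cases t with
    | nil => simp [consec, lastD]
    | cons b t' =>
      have := ih (by simp)
      simp only [consec, lastD] at this ⊢
      simp_all

lemma lastD_append (path : List (Int × Int)) (x : Int × Int) :
    lastD (path ++ [x]) = x := by simp [lastD]

lemma edgesOf_append (path : List (Int × Int)) (x : Int × Int) (h : path ≠ []) :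
    edgesOf (path ++ [x]) = edgesOf path ++ [canonB (lastD path) x] := by
  simp [edgesOf, consec_append path x h]

lemma dirListOf_append (path : List (Int × Int)) (x : Int × Int) (h : path ≠ []) :
    dirListOf (path ++ [x]) =
      dirListOf path ++ [((lastD path).1, (lastD path).2, x.1, x.2), (x.1, x.2, (lastD path).1, (lastD path).2)] := by
  simp [dirListOf, consec_append path x h]

lemma mem_dirListOf_iff (a b : Int × Int) (path : List (Int × Int)) :
    (a.1, a.2, b.1, b.2) ∈ dirListOf path ↔ canonB a b ∈ edgesOf path := by
  obtain ⟨a1, a2⟩ := a; obtain ⟨b1, b2⟩ := b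
  simp only [dirListOf, edgesOf, List.mem_flatMap, List.mem_map]
  constructor
  · rintro ⟨⟨⟨p1, p2⟩, ⟨q1, q2⟩⟩, hpq, hm⟩
    refine ⟨_, hpq, ?_⟩
    simp only [List.mem_cons, List.not_mem_nil, or_false, Prod.mk.injEq] at hm
    rw [canonB_eq_iff]
    simp only [Prod.mk.injEq]
    tauto
  · rintro ⟨⟨⟨p1, p2⟩, ⟨q1, q2⟩⟩, hpq, hc⟩
    refine ⟨_, hpq, ?_⟩
    rw [canonB_eq_iff] at hc
    simp only [List.mem_cons, List.not_mem_nil, or_false, Prod.mk.injEq]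
    simp only [Prod.mk.injEq] at hc
    tauto

lemma mem_dirListOf_symm (a b : Int × Int) (path : List (Int × Int))
    (h : (a.1, a.2, b.1, b.2) ∈ dirListOf path) : (b.1, b.2, a.1, a.2) ∈ dirListOf path := by
  simp only [dirListOf, List.mem_flatMap] at h ⊢
  rcases h with ⟨pq, hpq, hm⟩
  refine ⟨pq, hpq, ?_⟩
  simp only [List.mem_cons, Prod.mk.injEq] at hm ⊢
  tauto

lemma ite_append_ne_nil (p : Prop) [Decidable p] (path : List (Int × Int)) (x : Int × Int)
    (h : path ≠ []) : (if p then path ++ [x] else path) ≠ [] := by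
  split <;> simp [h]

lemma pathStep_ne_nil (path : List (Int × Int)) (c : Char) (h : path ≠ []) : pathStep path c ≠ [] :=
  ite_append_ne_nil _ path _ h

-- one step of A's loop, expressed through the ghost path
lemma stepA_pair (c : Char) (path : List (Int × Int)) (h : path ≠ []) :
    stepA (((PySem.Set.ofList (edgesOf path)).length : Int),
           PySem.Set.ofList (dirListOf path), (lastD path).1, (lastD path).2) c
      = (((PySem.Set.ofList (edgesOf (pathStep path c))).length : Int),
          PySem.Set.ofList (dirListOf (pathStep path c)),
          (lastD (pathStep path c)).1, (lastD (pathStep path c)).2) := by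
  simp only [stepA, pathStep]
  by_cases hb : -5 ≤ (lastD path).1 + (PySem.Dict.getD moveA c (0, 0)).1 ∧
      (lastD path).1 + (PySem.Dict.getD moveA c (0, 0)).1 ≤ 5 ∧
      -5 ≤ (lastD path).2 + (PySem.Dict.getD moveA c (0, 0)).2 ∧
      (lastD path).2 + (PySem.Dict.getD moveA c (0, 0)).2 ≤ 5
  · rw [if_pos hb, if_pos hb]
    set e : Int × Int := ((lastD path).1 + (PySem.Dict.getD moveA c (0, 0)).1,
                          (lastD path).2 + (PySem.Dict.getD moveA c (0, 0)).2) with he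
    have heq : edgesOf (path ++ [e]) = edgesOf path ++ [canonB (lastD path) e] :=
      edgesOf_append path e h
    have hdq : dirListOf (path ++ [e]) =
        (dirListOf path ++ [((lastD path).1, (lastD path).2, e.1, e.2)]) ++
          [(e.1, e.2, (lastD path).1, (lastD path).2)] := by
      rw [dirListOf_append path e h]; simp
    have hmemiff : (((lastD path).1, (lastD path).2, e.1, e.2) : Int × Int × Int × Int) ∈
        PySem.Set.ofList (dirListOf path) ↔ canonB (lastD path) e ∈ PySem.Set.ofList (edgesOf path) := by
      rw [PySem.Set.mem_ofList, PySem.Set.mem_ofList]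
      exact mem_dirListOf_iff (lastD path) e path
    by_cases hv : (((lastD path).1, (lastD path).2, e.1, e.2) : Int × Int × Int × Int) ∈
        PySem.Set.ofList (dirListOf path)
    · rw [if_pos ((PySem.Set.contains_iff _ _).2 hv)]
      have hvc := hmemiff.1 hv
      have hsym : ((e.1, e.2, (lastD path).1, (lastD path).2) : Int × Int × Int × Int) ∈
          PySem.Set.ofList (dirListOf path) := by
        rw [PySem.Set.mem_ofList] at hv ⊢
        exact mem_dirListOf_symm (lastD path) e path hv
      simp only [heq, hdq, lastD_append, PySem.Set.ofList_append_singleton,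
        PySem.Set.add_of_mem hvc, PySem.Set.add_of_mem hv, PySem.Set.add_of_mem hsym]
    · rw [if_neg (fun hc => hv ((PySem.Set.contains_iff _ _).1 hc))]
      have hvc : canonB (lastD path) e ∉ PySem.Set.ofList (edgesOf path) :=
        fun hx => hv (hmemiff.2 hx)
      simp only [heq, hdq, lastD_append, PySem.Set.ofList_append_singleton,
        PySem.Set.add_of_not_mem hvc, List.length_append, List.length_cons,
        List.length_nil, Prod.mk.injEq]
      exact ⟨rfl, rfl, trivial⟩
  · rw [if_neg hb, if_neg hb]

-- A's loop invariant: its state is determined by the ghost path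
lemma loopA_inv (cs : List Char) (path : List (Int × Int)) (h : path ≠ []) :
    cs.foldl stepA (((PySem.Set.ofList (edgesOf path)).length : Int),
                     PySem.Set.ofList (dirListOf path), (lastD path).1, (lastD path).2)
      = (((PySem.Set.ofList (edgesOf (cs.foldl pathStep path))).length : Int),
          PySem.Set.ofList (dirListOf (cs.foldl pathStep path)),
          (lastD (cs.foldl pathStep path)).1, (lastD (cs.foldl pathStep path)).2) := by
  induction cs generalizing path with
  | nil => simp
  | cons c cs ih =>
    rw [List.foldl_cons, List.foldl_cons, stepA_pair c path h]
    exact ih (pathStep path c) (pathStep_ne_nil path c h)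

-- one step of B's pass 1, expressed through the ghost path
lemma stepB_pair (c : Char) (path : List (Int × Int)) (h : path ≠ []) :
    stepB ((lastD path).1, (lastD path).2, (edgesOf path).map enc) c
      = ((lastD (pathStep path c)).1, (lastD (pathStep path c)).2,
         (edgesOf (pathStep path c)).map enc) := by
  have hdm : deltaB = moveA := rfl
  simp only [stepB, pathStep, hdm]
  by_cases hb : -5 ≤ (lastD path).1 + (PySem.Dict.getD moveA c (0, 0)).1 ∧
      (lastD path).1 + (PySem.Dict.getD moveA c (0, 0)).1 ≤ 5 ∧
      -5 ≤ (lastD path).2 + (PySem.Dict.getD moveA c (0, 0)).2 ∧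
      (lastD path).2 + (PySem.Dict.getD moveA c (0, 0)).2 ≤ 5
  · rw [if_pos hb, if_pos hb]
    set e : Int × Int := ((lastD path).1 + (PySem.Dict.getD moveA c (0, 0)).1,
                          (lastD path).2 + (PySem.Dict.getD moveA c (0, 0)).2) with he
    rw [edgesOf_append path e h, lastD_append]
    simp only [List.map_append, List.map_cons, List.map_nil, Prod.mk.injEq]
    refine ⟨rfl, rfl, ?_⟩
    have h1 : e.1 = (lastD path).1 + (PySem.Dict.getD moveA c (0, 0)).1 := rfl
    have h2 : e.2 = (lastD path).2 + (PySem.Dict.getD moveA c (0, 0)).2 := rfl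
    simp only [canonB, enc, h1, h2]
  · rw [if_neg hb, if_neg hb]

lemma loopB_inv (cs : List Char) (path : List (Int × Int)) (h : path ≠ []) :
    cs.foldl stepB ((lastD path).1, (lastD path).2, (edgesOf path).map enc)
      = ((lastD (cs.foldl pathStep path)).1, (lastD (cs.foldl pathStep path)).2,
         (edgesOf (cs.foldl pathStep path)).map enc) := by
  induction cs generalizing path with
  | nil => simp
  | cons c cs ih =>
    rw [List.foldl_cons, List.foldl_cons, stepB_pair c path h]
    exact ih (pathStep path c) (pathStep_ne_nil path c h)

-- two nodup lists with the same members have the same length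
lemma len_eq_of_nodup_mem {α : Type} (l₁ l₂ : List α)
    (h1 : l₁.Nodup) (h2 : l₂.Nodup) (h : ∀ x, x ∈ l₁ ↔ x ∈ l₂) : l₁.length = l₂.length :=
  ((List.perm_ext_iff_of_nodup h1 h2).2 h).length_eq

-- first-occurrence dedup: length of dedup (a :: t)
lemma dedup_cons_len (a : Int) (t : List Int) :
    (PySem.List.dedup (a :: t)).length
      = (PySem.List.dedup (t.filter (fun x => decide (x ≠ a)))).length + 1 := by
  have h := len_eq_of_nodup_mem (PySem.List.dedup (a :: t))
      (a :: PySem.List.dedup (t.filter (fun x => decide (x ≠ a))))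
      (PySem.List.nodup_dedup _)
      (by
        refine List.nodup_cons.2 ⟨?_, PySem.List.nodup_dedup _⟩
        intro hmem
        rw [PySem.List.mem_dedup] at hmem
        simp at hmem)
      (by
        intro x
        simp only [PySem.List.mem_dedup, List.mem_cons, List.mem_filter, decide_eq_true_eq]
        by_cases hx : x = a <;> simp [hx])
  simpa using h

-- the adjacent scan over a ≤-sorted list counts its distinct values (prev = some p case)
lemma scan_some (s : List Int) (hs : s.Pairwise (· ≤ ·)) (p c : Int) (hp : ∀ x ∈ s, p ≤ x) :
    (s.foldl scanStep (c, some p)).1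
      = c + ((PySem.List.dedup (s.filter (fun x => decide (x ≠ p)))).length : Int) := by
  induction s generalizing p c with
  | nil => simp
  | cons a t ih =>
    have hpa : p ≤ a := hp a (List.mem_cons_self)
    have ha : ∀ x ∈ t, a ≤ x := fun x hx => (List.pairwise_cons.1 hs).1 x hx
    have ht : t.Pairwise (· ≤ ·) := (List.pairwise_cons.1 hs).2
    by_cases hap : a = p
    · subst hap
      have hstep : scanStep (c, some a) a = (c, some a) := by simp [scanStep]
      rw [List.foldl_cons, hstep, ih ht a c ha]
      simp
    · have hne : some a ≠ some p := by simp [hap]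
      have hstep : scanStep (c, some p) a = (c + 1, some a) := by
        simp [scanStep, hne]
      rw [List.foldl_cons, hstep, ih ht a (c + 1) ha]
      have hfilter : t.filter (fun x => decide (x ≠ p)) = t := by
        apply List.filter_eq_self.2
        intro x hx
        have h1 := ha x hx
        have h2 : x ≠ p := by omega
        simp [h2]
      have hcons : (a :: t).filter (fun x => decide (x ≠ p)) = a :: t := by
        rw [List.filter_cons_of_pos (by simp [hap]), hfilter]
      rw [hcons, dedup_cons_len a t]
      push_cast
      ring

-- the adjacent scan over a ≤-sorted list counts its distinct values
lemma scan_none (s : List Int) (hs : s.Pairwise (· ≤ ·)) :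
    (s.foldl scanStep ((0 : Int), (none : Option Int))).1
      = ((PySem.List.dedup s).length : Int) := by
  cases s with
  | nil => simp
  | cons a t =>
    have hstep : scanStep ((0 : Int), (none : Option Int)) a = (1, some a) := by
      simp [scanStep]
    have ha : ∀ x ∈ t, a ≤ x := fun x hx => (List.pairwise_cons.1 hs).1 x hx
    rw [List.foldl_cons, hstep,
      scan_some t (List.pairwise_cons.1 hs).2 a 1 ha, dedup_cons_len a t]
    push_cast
    ring

-- dedup length is a function of the member set
lemma dedup_len_eq_of_mem_iff {α : Type} [BEq α] [LawfulBEq α] (l₁ l₂ : List α)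
    (h : ∀ x, x ∈ l₁ ↔ x ∈ l₂) :
    (PySem.List.dedup l₁).length = (PySem.List.dedup l₂).length :=
  len_eq_of_nodup_mem _ _ (PySem.List.nodup_dedup _) (PySem.List.nodup_dedup _)
    (by intro x; rw [PySem.List.mem_dedup, PySem.List.mem_dedup]; exact h x)

-- an injective-on-members map preserves the dedup length
lemma dedup_map_len {α β : Type} [BEq α] [LawfulBEq α] [BEq β] [LawfulBEq β] (f : α → β) (l : List α)
    (hinj : ∀ x ∈ l, ∀ y ∈ l, f x = f y → x = y) :
    (PySem.List.dedup (l.map f)).length = (PySem.List.dedup l).length := by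
  have h1 : (PySem.List.dedup (l.map f)).length = ((PySem.List.dedup l).map f).length := by
    apply len_eq_of_nodup_mem _ _ (PySem.List.nodup_dedup _)
    · exact List.Nodup.map_on
        (fun x hx y hy => hinj x ((PySem.List.mem_dedup _ _).1 hx) y ((PySem.List.mem_dedup _ _).1 hy))
        (PySem.List.nodup_dedup _)
    · intro x
      simp
  rw [h1, List.length_map]

-- every point of the ghost path stays in the board
lemma path_bounded (cs : List Char) (p : List (Int × Int)) (hp : ∀ pt ∈ p, InB pt) :
    ∀ pt ∈ cs.foldl pathStep p, InB pt := by
  induction cs generalizing p with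
  | nil => exact hp
  | cons c cs ih =>
    rw [List.foldl_cons]
    apply ih
    intro pt hpt
    simp only [pathStep] at hpt
    split at hpt
    · rcases List.mem_append.1 hpt with h | h
      · exact hp pt h
      · simp only [List.mem_singleton] at h
        subst h
        unfold InB
        omega
    · exact hp pt hpt

-- both endpoints of every canonical edge lie on the path
lemma edges_bounded (p : List (Int × Int)) (hp : ∀ pt ∈ p, InB pt) :
    ∀ e ∈ edgesOf p, InB e.1 ∧ InB e.2 := by
  intro e he
  simp only [edgesOf, List.mem_map] at he
  rcases he with ⟨⟨a, b⟩, hab, hc⟩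
  have hmem := List.of_mem_zip hab
  have ha : InB a := hp a hmem.1
  have hb : InB b := hp b (List.mem_of_mem_tail hmem.2)
  subst hc
  simp only [canonB]
  split <;> exact ⟨by assumption, by assumption⟩

-- the base-11 code is injective on in-board edges
lemma enc_inj (e₁ e₂ : (Int × Int) × (Int × Int))
    (h₁ : InB e₁.1 ∧ InB e₁.2) (h₂ : InB e₂.1 ∧ InB e₂.2) (h : enc e₁ = enc e₂) : e₁ = e₂ := by
  obtain ⟨⟨a1, a2⟩, ⟨b1, b2⟩⟩ := e₁
  obtain ⟨⟨p1, p2⟩, ⟨q1, q2⟩⟩ := e₂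
  simp only [enc, InB] at h h₁ h₂
  simp only [Prod.mk.injEq]
  omega

-- PySem.Set.ofList and PySem.List.dedup have the same length
lemma set_len_eq_dedup {α : Type} [BEq α] [LawfulBEq α] (l : List α) :
    (PySem.Set.ofList l).length = (PySem.List.dedup l).length :=
  len_eq_of_nodup_mem _ _ (PySem.Set.nodup_ofList _) (PySem.List.nodup_dedup _)
    (by intro x; rw [PySem.Set.mem_ofList, PySem.List.mem_dedup])

-- ===== VERDICT (by name: the statement is the Claim_ definition above) =====
theorem solution_spec : Claim_equal_solution := by
  intro dirs _ hpre
  unfold Spec_solution solution solution_alt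
  set cs := dirs.toList with hcs
  set P := cs.foldl pathStep [((0 : Int), (0 : Int))] with hP
  have hA : cs.foldl stepA (0, PySem.Set.empty, 0, 0)
      = (((PySem.Set.ofList (edgesOf P)).length : Int), PySem.Set.ofList (dirListOf P),
         (lastD P).1, (lastD P).2) := by
    rw [show ((0 : Int), (PySem.Set.empty : PySem.Set (Int × Int × Int × Int)), (0 : Int), (0 : Int)) =
          (((PySem.Set.ofList (edgesOf [((0 : Int), (0 : Int))])).length : Int),
            PySem.Set.ofList (dirListOf [((0 : Int), (0 : Int))]),
            (lastD [((0 : Int), (0 : Int))]).1, (lastD [((0 : Int), (0 : Int))]).2) from rfl]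
    exact loopA_inv cs [(0, 0)] (by simp)
  have hB : cs.foldl stepB ((0 : Int), (0 : Int), ([] : List Int))
      = ((lastD P).1, (lastD P).2, (edgesOf P).map enc) := by
    rw [show ((0 : Int), (0 : Int), ([] : List Int)) =
          ((lastD [((0 : Int), (0 : Int))]).1, (lastD [((0 : Int), (0 : Int))]).2,
            (edgesOf [((0 : Int), (0 : Int))]).map enc) from rfl]
    exact loopB_inv cs [(0, 0)] (by simp)
  rw [hA, hB]
  have hbnd : ∀ pt ∈ P, InB pt :=
    path_bounded cs [(0, 0)] (by intro pt hpt; simp at hpt; subst hpt; unfold InB; omega)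
  have hscan := scan_none (PySem.List.sorted ((edgesOf P).map enc) (fun x => x) false)
      (by simpa using PySem.List.sorted_pairwise ((edgesOf P).map enc) (fun x : Int => x))
  simp only [hscan]
  have hsortmem : (PySem.List.dedup (PySem.List.sorted ((edgesOf P).map enc) (fun x => x) false)).length
      = (PySem.List.dedup ((edgesOf P).map enc)).length := by
    apply dedup_len_eq_of_mem_iff
    intro x
    exact PySem.List.mem_sorted _ _ _ _
  have hmap : (PySem.List.dedup ((edgesOf P).map enc)).length
      = (PySem.List.dedup (edgesOf P)).length := by
    apply dedup_map_len
    intro x hx y hy hxy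
    exact enc_inj x y (edges_bounded P hbnd x hx) (edges_bounded P hbnd y hy) hxy
  rw [hsortmem, hmap, set_len_eq_dedup]
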